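-- pv_equiv track=rewrite | github.com/PacoARNGO/ProjetInfo | GraphicGame/interface/plateau.py | premier_joueur
-- ===== SOURCE A (Python) =====
-- def premier_joueur(pieces):
--     """
--     Renvoie l'indice du joueur 1 possédant un double élevé
--     :param pieces: list
--     :return: int
--     """
--     i=0
--     for k in range(6,-1,-1):
--             if [k,k] in pieces[0]:
--                 break
--             elif [k,k] in pieces[1]:
--                 i = 1
--                 break
--     return i
-- ===== SOURCE B (Python) =====
-- def premier_joueur(pieces):
--     d0 = max((k for k in range(7) if [k, k] in pieces[0]), default=-1)
--     d1 = max((k for k in range(7) if [k, k] in pieces[1]), default=-1)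
--     return 0 if d0 >= d1 else 1
-- ===== Notes on version B (the rewrite author's own statement) =====
-- stated objective: simpler
-- what changed: Replaces the interleaved descending early-break scan over both hands with two independent max-over-generator reductions (best double per player, default -1) followed by a single >= comparison.
-- outside the precondition, e.g. on premier_joueur([[[6, 6]]]): A returns 0, B raises IndexError
import Mathlib
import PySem

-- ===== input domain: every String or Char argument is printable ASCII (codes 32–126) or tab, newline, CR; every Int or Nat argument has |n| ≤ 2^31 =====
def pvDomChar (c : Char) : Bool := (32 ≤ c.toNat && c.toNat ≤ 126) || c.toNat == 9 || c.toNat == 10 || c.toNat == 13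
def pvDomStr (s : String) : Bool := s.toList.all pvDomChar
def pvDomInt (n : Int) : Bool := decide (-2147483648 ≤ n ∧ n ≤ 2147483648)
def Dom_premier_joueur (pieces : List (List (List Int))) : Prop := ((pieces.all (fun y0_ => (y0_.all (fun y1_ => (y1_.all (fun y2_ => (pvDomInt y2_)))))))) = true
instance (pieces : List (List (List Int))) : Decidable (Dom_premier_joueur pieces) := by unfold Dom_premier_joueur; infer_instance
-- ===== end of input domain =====

-- B replaces A's interleaved descending early-break scan by two independent
-- best-double reductions (max with default -1) plus one >= comparison (objective: simpler).

-- ===== PORT A =====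
-- the for-k loop with its two breaks; returning from the recursion = break
def pjLoop (p0 p1 : List (List Int)) : List Int → Int
  | [] => 0
  | k :: ks =>
    if p0.contains [k, k] then 0
    else if p1.contains [k, k] then 1
    else pjLoop p0 p1 ks

def premier_joueur (pieces : List (List (List Int))) : Int :=
  pjLoop ((PySem.List.pyGet? pieces 0).getD [])
         ((PySem.List.pyGet? pieces 1).getD [])
         (PySem.List.pyRange 6 (-1) (-1))

-- ===== PORT B =====
-- max((k for k in range(7) if [k,k] in p), default=-1)
def bestDouble (p : List (List Int)) : Int :=
  (((PySem.List.pyRange 0 7 1).filter (fun k => p.contains [k, k])).max?).getD (-1)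

def premier_joueur_alt (pieces : List (List (List Int))) : Int :=
  let d0 := bestDouble ((PySem.List.pyGet? pieces 0).getD [])
  let d1 := bestDouble ((PySem.List.pyGet? pieces 1).getD [])
  if d0 ≥ d1 then 0 else 1

-- ===== PRECONDITION & SPEC =====
-- Pre_ excludes inputs with fewer than two hands: there A raises IndexError, except the
-- accidental case of a single hand containing [6,6] (A returns 0 via short-circuit, B raises).
def Pre_premier_joueur (pieces : List (List (List Int))) : Prop := 2 ≤ pieces.length
instance (pieces : List (List (List Int))) : Decidable (Pre_premier_joueur pieces) := by unfold Pre_premier_joueur; infer_instance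
def pvWitness_premier_joueur : List (List (List Int)) := [[[6, 6]], [[1, 1]]]

def Spec_premier_joueur (pieces : List (List (List Int))) (out : Int) : Prop := out = premier_joueur_alt pieces
instance (pieces : List (List (List Int))) (out : Int) : Decidable (Spec_premier_joueur pieces out) := by unfold Spec_premier_joueur; infer_instance

-- ===== CLAIM (what is proved, stated in full; the proofs are below) =====
def Claim_equal_premier_joueur : Prop := ∀ (pieces : List (List (List Int))), Dom_premier_joueur pieces → Pre_premier_joueur pieces → Spec_premier_joueur pieces (premier_joueur pieces)

-- ===== LEMMAS AND PROOFS =====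

theorem pyRange_desc : PySem.List.pyRange 6 (-1) (-1) = [6, 5, 4, 3, 2, 1, 0] := by decide

theorem pyRange_asc : PySem.List.pyRange 0 7 1 = [0, 1, 2, 3, 4, 5, 6] := by decide

theorem bestDouble_eq (p : List (List Int)) :
    bestDouble p =
      (if p.contains [6, 6] then (6 : Int)
       else if p.contains [5, 5] then 5
       else if p.contains [4, 4] then 4
       else if p.contains [3, 3] then 3
       else if p.contains [2, 2] then 2
       else if p.contains [1, 1] then 1
       else if p.contains [0, 0] then 0
       else -1) := by
  unfold bestDouble
  rw [pyRange_asc]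
  by_cases h6 : [6, 6] ∈ p <;> by_cases h5 : [5, 5] ∈ p <;>
    by_cases h4 : [4, 4] ∈ p <;> by_cases h3 : [3, 3] ∈ p <;>
    by_cases h2 : [2, 2] ∈ p <;> by_cases h1 : [1, 1] ∈ p <;>
    by_cases h0 : [0, 0] ∈ p <;>
    simp [List.filter, h6, h5, h4, h3, h2, h1, h0]

theorem pjKey (a6 a5 a4 a3 a2 a1 a0 b6 b5 b4 b3 b2 b1 b0 : Bool) :
    (if a6 then (0 : Int) else if b6 then 1
     else if a5 then 0 else if b5 then 1
     else if a4 then 0 else if b4 then 1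
     else if a3 then 0 else if b3 then 1
     else if a2 then 0 else if b2 then 1
     else if a1 then 0 else if b1 then 1
     else if a0 then 0 else if b0 then 1 else 0)
    =
    (if (if a6 then (6 : Int) else if a5 then 5 else if a4 then 4 else if a3 then 3
         else if a2 then 2 else if a1 then 1 else if a0 then 0 else -1)
        ≥
        (if b6 then (6 : Int) else if b5 then 5 else if b4 then 4 else if b3 then 3
         else if b2 then 2 else if b1 then 1 else if b0 then 0 else -1)
     then 0 else 1) := by
  revert a6 a5 a4 a3 a2 a1 a0 b6 b5 b4 b3 b2 b1 b0
  decide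

theorem premier_joueur_spec : Claim_equal_premier_joueur := by
  intro pieces _ hpre
  unfold Spec_premier_joueur
  match pieces, hpre with
  | p0 :: p1 :: rest, _ =>
    show premier_joueur (p0 :: p1 :: rest) = premier_joueur_alt (p0 :: p1 :: rest)
    unfold premier_joueur premier_joueur_alt
    simp only [PySem.List.pyGet?, PySem.List.pyIdx?]
    norm_num
    rw [pyRange_desc, bestDouble_eq, bestDouble_eq]
    simp only [pjLoop]
    exact pjKey _ _ _ _ _ _ _ _ _ _ _ _ _ _
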